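-- pv_equiv track=rewrite | github.com/Tanser2024/Tanser-s_study_data | homework9/04123.py | dfs
-- ===== SOURCE A (Python) =====
-- directions = [(1, 2), (2, 1), (-1, 2), (-2, 1), (-1, -2), (-2, -1), (1, -2), (2, -1)]
--
-- def dfs(board, x, y, steps, total_steps, visited):
--     if steps == total_steps:
--         return 1
--     count = 0
--     for dx, dy in directions:
--         nx, ny = x + dx, y + dy
--         if 0 <= nx < len(board) and 0 <= ny < len(board[0]) and (nx, ny) not in visited:
--             count += dfs(board, nx, ny, steps + 1, total_steps, visited|{(nx,ny)})
--     return count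
-- ===== SOURCE B (Python) =====
-- directions = [(1, 2), (2, 1), (-1, 2), (-2, 1), (-1, -2), (-2, -1), (1, -2), (2, -1)]
--
-- def dfs(board, x, y, steps, total_steps, visited):
--     count = 0
--     stack = [(x, y, steps, visited)]
--     while stack:
--         cx, cy, cs, cv = stack.pop()
--         if cs == total_steps:
--             count += 1
--             continue
--         for dx, dy in directions:
--             nx, ny = cx + dx, cy + dy
--             if 0 <= nx < len(board) and 0 <= ny < len(board[0]) and (nx, ny) not in cv:
--                 stack.append((nx, ny, cs + 1, cv | {(nx, ny)}))
--     return count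
-- ===== Notes on version B (the rewrite author's own statement) =====
-- stated objective: alternative
-- what changed: Replaced the recursive DFS with an iterative worklist loop: a stack of (x, y, steps, visited) states is popped and expanded in place, accumulating the count in a single variable instead of summing recursive return values.
import Mathlib
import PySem

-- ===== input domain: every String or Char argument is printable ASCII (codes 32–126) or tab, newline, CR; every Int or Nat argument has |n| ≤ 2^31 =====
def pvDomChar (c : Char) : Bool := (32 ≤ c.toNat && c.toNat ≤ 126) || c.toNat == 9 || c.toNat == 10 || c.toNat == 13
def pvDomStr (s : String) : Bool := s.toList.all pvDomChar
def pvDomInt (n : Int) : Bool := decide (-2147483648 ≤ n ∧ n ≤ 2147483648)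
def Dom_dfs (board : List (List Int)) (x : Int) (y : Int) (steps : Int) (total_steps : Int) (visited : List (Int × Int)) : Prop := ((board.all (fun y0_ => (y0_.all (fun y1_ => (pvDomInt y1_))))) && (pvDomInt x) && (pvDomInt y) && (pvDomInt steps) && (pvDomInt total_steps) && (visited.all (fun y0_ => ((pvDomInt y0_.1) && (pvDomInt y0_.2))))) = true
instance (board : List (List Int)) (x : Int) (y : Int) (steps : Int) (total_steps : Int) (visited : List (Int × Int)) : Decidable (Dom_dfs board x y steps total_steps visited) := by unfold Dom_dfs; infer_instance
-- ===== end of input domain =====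

-- ===== PORT A =====
-- B replaces A's recursive DFS with an explicit worklist (stack) loop accumulating a counter (objective: alternative decomposition, same cost).
-- Both ports carry a Nat fuel (rows*cols+1) as a totality guard only: the recursion/worklist depth is bounded by the
-- number of board cells, since every recursive step adds a fresh in-bounds cell to `visited`, so the guard never fires
-- on inputs where the Python returns.
def pvDirections : List (Int × Int) := [(1, 2), (2, 1), (-1, 2), (-2, 1), (-1, -2), (-2, -1), (1, -2), (2, -1)]

def dfsAux (board : List (List Int)) (total_steps : Int) (f : Nat) (x y steps : Int) (visited : List (Int × Int)) : Int :=
  if steps = total_steps then 1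
  else
    match f with
    | 0 => 0
    | f' + 1 =>
      pvDirections.foldl (fun count d =>
        let nx := x + d.1
        let ny := y + d.2
        if 0 ≤ nx ∧ nx < (board.length : Int) ∧ 0 ≤ ny ∧ ny < ((board.headD []).length : Int) ∧ (nx, ny) ∉ visited
        then count + dfsAux board total_steps f' nx ny (steps + 1) (PySem.Set.add visited (nx, ny))
        else count) 0
termination_by structural f

def dfs (board : List (List Int)) (x : Int) (y : Int) (steps : Int) (total_steps : Int) (visited : List (Int × Int)) : Int :=
  dfsAux board total_steps (board.length * (board.headD []).length + 1) x y steps visited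

-- ===== PORT B =====
-- a pushed state: (nx, ny, cs+1, cv ∪ {(nx,ny)}, remaining fuel)
def pvChildren (board : List (List Int)) (cx cy cs : Int) (cv : List (Int × Int)) (f : Nat) :
    List (Int × Int × Int × List (Int × Int) × Nat) :=
  pvDirections.filterMap (fun d =>
    let nx := cx + d.1
    let ny := cy + d.2
    if 0 ≤ nx ∧ nx < (board.length : Int) ∧ 0 ≤ ny ∧ ny < ((board.headD []).length : Int) ∧ (nx, ny) ∉ cv
    then some (nx, ny, cs + 1, PySem.Set.add cv (nx, ny), f)
    else none)

-- worklist measure; the lemmas below are cited by pvLoop's decreasing_by (proofs kept small by hand)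
def pvMeasure : List (Int × Int × Int × List (Int × Int) × Nat) → Nat
  | [] => 0
  | s :: rest => 9 ^ s.2.2.2.2 + pvMeasure rest

theorem pv_measure_tail_lt (s : Int × Int × Int × List (Int × Int) × Nat)
    (rest : List (Int × Int × Int × List (Int × Int) × Nat)) :
    pvMeasure rest < pvMeasure (s :: rest) :=
  Nat.lt_add_of_pos_left (Nat.pow_pos (by decide))

theorem pv_filterMap_measure_le (f' : Nat) (g : (Int × Int) → Option (Int × Int × Int × List (Int × Int) × Nat))
    (hg : ∀ d s, g d = some s → s.2.2.2.2 = f') :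
    ∀ (l : List (Int × Int)), pvMeasure (l.filterMap g) ≤ l.length * 9 ^ f' := by
  intro l
  induction l with
  | nil => exact Nat.zero_le _
  | cons a t ih =>
    rw [List.filterMap_cons, List.length_cons, Nat.succ_mul]
    cases hga : g a with
    | none => exact Nat.le_trans ih (Nat.le_add_right _ _)
    | some s =>
      rw [pvMeasure, hg a s hga, Nat.add_comm (t.length * 9 ^ f') (9 ^ f')]
      exact Nat.add_le_add_left ih _

theorem pv_measure_append (a b : List (Int × Int × Int × List (Int × Int) × Nat)) :
    pvMeasure (a ++ b) = pvMeasure a + pvMeasure b := by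
  induction a with
  | nil => exact (Nat.zero_add _).symm
  | cons s t ih => rw [List.cons_append, pvMeasure, pvMeasure, ih, Nat.add_assoc]

theorem pv_measure_children_lt (board : List (List Int)) (cx cy cs : Int)
    (cv : List (Int × Int)) (f' : Nat) (rest : List (Int × Int × Int × List (Int × Int) × Nat)) :
    pvMeasure (pvChildren board cx cy cs cv f' ++ rest) < pvMeasure ((cx, cy, cs, cv, f' + 1) :: rest) := by
  rw [pv_measure_append, pvMeasure]
  refine Nat.add_lt_add_right ?_ (pvMeasure rest)
  refine Nat.lt_of_le_of_lt (pv_filterMap_measure_le f' _ ?_ pvDirections) ?_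
  · intro d s h
    simp only at h
    split at h
    · cases h; rfl
    · cases h
  · rw [Nat.pow_succ, Nat.mul_comm (9 ^ f') 9]
    exact Nat.mul_lt_mul_of_lt_of_le (by decide) (Nat.le_refl _) (Nat.pow_pos (by decide))

def pvLoop (board : List (List Int)) (total_steps : Int) :
    List (Int × Int × Int × List (Int × Int) × Nat) → Int → Int
  | [], count => count
  | (cx, cy, cs, cv, f) :: rest, count =>
    if cs = total_steps then pvLoop board total_steps rest (count + 1)
    else
      match f with
      | 0 => pvLoop board total_steps rest count
      | f' + 1 => pvLoop board total_steps (pvChildren board cx cy cs cv f' ++ rest) count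
  termination_by stack _ => pvMeasure stack
  decreasing_by
  · exact pv_measure_tail_lt _ _
  · exact pv_measure_tail_lt _ _
  · exact pv_measure_children_lt board cx cy cs cv f' rest

def dfs_alt (board : List (List Int)) (x : Int) (y : Int) (steps : Int) (total_steps : Int) (visited : List (Int × Int)) : Int :=
  pvLoop board total_steps [(x, y, steps, visited, board.length * (board.headD []).length + 1)] 0

-- ===== PRECONDITION & SPEC =====
def Spec_dfs (board : List (List Int)) (x : Int) (y : Int) (steps : Int) (total_steps : Int) (visited : List (Int × Int)) (out : Int) : Prop := out = dfs_alt board x y steps total_steps visited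
instance (board : List (List Int)) (x : Int) (y : Int) (steps : Int) (total_steps : Int) (visited : List (Int × Int)) (out : Int) : Decidable (Spec_dfs board x y steps total_steps visited out) := by unfold Spec_dfs; infer_instance

-- ===== CLAIM (what is proved, stated in full; the proofs are below) =====
def Claim_equal_dfs : Prop := ∀ (board : List (List Int)) (x : Int) (y : Int) (steps : Int) (total_steps : Int) (visited : List (Int × Int)), Dom_dfs board x y steps total_steps visited → Spec_dfs board x y steps total_steps visited (dfs board x y steps total_steps visited)

-- ===== LEMMAS AND PROOFS =====

-- generic: a foldl that conditionally adds equals the sum over the matching filterMap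
theorem pv_foldl_filterMap_sum {alpha beta : Type} (p : alpha → Prop) [DecidablePred p]
    (h : alpha → beta) (k : beta → Int) (g : alpha → Int) (hk : ∀ d, k (h d) = g d) :
    ∀ (l : List alpha) (acc : Int),
      l.foldl (fun c d => if p d then c + g d else c) acc
        = acc + ((l.filterMap (fun d => if p d then some (h d) else none)).map k).sum := by
  intro l
  induction l with
  | nil => simp
  | cons a t ih =>
    intro acc
    by_cases hp : p a <;> simp [hp, ih, hk] <;> ring

-- one unfolding of the recursion equals the sum of dfsAux over the pushed child states
theorem pv_dfsAux_succ (board : List (List Int)) (total_steps : Int) (f : Nat)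
    (x y steps : Int) (visited : List (Int × Int)) (hs : ¬ steps = total_steps) :
    dfsAux board total_steps (f + 1) x y steps visited
      = ((pvChildren board x y steps visited f).map
          (fun s => dfsAux board total_steps s.2.2.2.2 s.1 s.2.1 s.2.2.1 s.2.2.2.1)).sum := by
  rw [dfsAux]
  simp only [hs, if_false]
  exact (pv_foldl_filterMap_sum
    (fun d => 0 ≤ x + d.1 ∧ x + d.1 < (board.length : Int) ∧ 0 ≤ y + d.2 ∧ y + d.2 < ((board.headD []).length : Int) ∧ (x + d.1, y + d.2) ∉ visited)
    (fun d => (x + d.1, y + d.2, steps + 1, PySem.Set.add visited (x + d.1, y + d.2), f))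
    (fun s => dfsAux board total_steps s.2.2.2.2 s.1 s.2.1 s.2.2.1 s.2.2.2.1)
    (fun d => dfsAux board total_steps f (x + d.1) (y + d.2) (steps + 1) (PySem.Set.add visited (x + d.1, y + d.2)))
    (fun d => rfl) pvDirections 0).trans (zero_add _)

-- the worklist loop computes the accumulator plus the sum of dfsAux over the stack
theorem pv_loop_eq_sum (board : List (List Int)) (total_steps : Int) :
    ∀ (stack : List (Int × Int × Int × List (Int × Int) × Nat)) (count : Int),
      pvLoop board total_steps stack count
        = count + (stack.map
            (fun s => dfsAux board total_steps s.2.2.2.2 s.1 s.2.1 s.2.2.1 s.2.2.2.1)).sum := by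
  intro stack count
  induction stack, count using pvLoop.induct board total_steps with
  | case1 count => simp [pvLoop]
  | case2 cx cy cv f rest count ih =>
    rw [pvLoop.eq_def]
    simp only [ih, List.map_cons, List.sum_cons]
    rw [dfsAux.eq_def]
    simp only [eq_self_iff_true, if_true]
    ring
  | case3 cx cy cs cv rest count hne ih =>
    rw [pvLoop.eq_def]
    simp only [if_neg hne, ih, List.map_cons, List.sum_cons]
    rw [dfsAux.eq_def]
    simp only [if_neg hne]
    omega
  | case4 cx cy cs cv rest count hne f' ih =>
    rw [pvLoop.eq_def]
    simp only [if_neg hne, ih, List.map_append, List.sum_append, List.map_cons, List.sum_cons]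
    rw [pv_dfsAux_succ board total_steps f' cx cy cs cv hne]
    try omega
    try ring

-- ===== VERDICT (by name: the statement is the Claim_ definition above) =====
theorem dfs_spec : Claim_equal_dfs := by
  intro board x y steps total_steps visited _
  unfold Spec_dfs dfs dfs_alt
  rw [pv_loop_eq_sum]
  simp
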